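-- pv_equiv track=rewrite | github.com/GolzitskyNikolay/SPEAC-analysis | speac/speac_chapter_7/speac.py | collect_beat_lists
-- ===== SOURCE A (Python) =====
-- def collect_beat_lists(entrance_lists):
--     result = []
--     local_result = []
--     need_to_add_next = False
--     first = True
--     for simultaneous_event in entrance_lists:
--         if not need_to_add_next and not first:
--             result.append(local_result)
--             local_result = []
--
--         first = False
--         local_result.append(simultaneous_event)
--         need_to_add_next = False
--
--         for event in simultaneous_event:
--             if len(event) == 6:
--                 need_to_add_next = True
--
--     result.append(local_result)
--     return result
-- ===== SOURCE B (Python) =====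
-- def collect_beat_lists(entrance_lists):
--     n = len(entrance_lists)
--     # cut AFTER each simultaneous event that contains no length-6 event
--     cuts = [i + 1 for i, ev in enumerate(entrance_lists)
--             if not any(len(e) == 6 for e in ev)]
--     # the end of the sequence is always a boundary (and the only one when empty)
--     if not cuts or cuts[-1] != n:
--         cuts.append(n)
--     result = []
--     start = 0
--     for cut in cuts:
--         result.append(entrance_lists[start:cut])
--         start = cut
--     return result
-- ===== Notes on version B (the rewrite author's own statement) =====
-- stated objective: alternative
-- what changed: Replaced the need_to_add_next/first state machine that grows a local accumulator with a two-pass index-table shape: first collect the cut indices (after each simultaneous event lacking a length-6 inner event, plus the sequence end), then emit the slices between consecutive cuts.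
import Mathlib
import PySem

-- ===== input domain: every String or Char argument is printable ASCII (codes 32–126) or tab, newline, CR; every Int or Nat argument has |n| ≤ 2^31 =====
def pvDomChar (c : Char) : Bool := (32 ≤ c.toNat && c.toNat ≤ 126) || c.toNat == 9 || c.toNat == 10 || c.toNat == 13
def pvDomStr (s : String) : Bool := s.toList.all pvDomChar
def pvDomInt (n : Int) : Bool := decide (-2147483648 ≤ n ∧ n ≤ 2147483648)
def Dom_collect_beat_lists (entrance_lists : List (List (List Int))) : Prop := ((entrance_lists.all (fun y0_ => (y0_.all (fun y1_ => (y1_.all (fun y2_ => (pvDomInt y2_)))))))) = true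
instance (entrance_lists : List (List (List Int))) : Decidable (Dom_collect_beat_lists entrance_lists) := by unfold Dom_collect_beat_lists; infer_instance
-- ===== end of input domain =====

-- B replaces A's need_to_add_next/first state machine by a cut-index table plus slicing (alternative decomposition, same cost).


-- ===== PORT A =====
-- the loop body of A (state: result, local_result, need_to_add_next, first)
def pvStepA (s : List (List (List (List Int))) × List (List (List Int)) × Bool × Bool)
    (simultaneous_event : List (List Int)) :
    List (List (List (List Int))) × List (List (List Int)) × Bool × Bool :=
  match s with
  | (result, local_result, need_to_add_next, first) =>
    let (result, local_result) :=
      if !need_to_add_next && !first then (result ++ [local_result], ([] : List (List (List Int))))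
      else (result, local_result)
    let local_result := local_result ++ [simultaneous_event]
    let need_to_add_next :=
      simultaneous_event.foldl (fun need event => if event.length = 6 then true else need) false
    (result, local_result, need_to_add_next, false)

def collect_beat_lists (entrance_lists : List (List (List Int))) : List (List (List (List Int))) :=
  let s := entrance_lists.foldl pvStepA ([], [], false, true)
  s.1 ++ [s.2.1]

-- ===== PORT B =====
def collect_beat_lists_alt (entrance_lists : List (List (List Int))) : List (List (List (List Int))) :=
  let n : Int := entrance_lists.length
  let cuts : List Int :=
    (PySem.List.enumerate entrance_lists 0).filterMap
      (fun p => if p.2.any (fun e => e.length == 6) then none else some (p.1 + 1))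
  let cuts := if cuts.getLast? = some n then cuts else cuts ++ [n]
  (cuts.foldl
    (fun (s : List (List (List (List Int))) × Int) cut =>
      (s.1 ++ [PySem.List.slice entrance_lists (some s.2) (some cut)], cut))
    ([], 0)).1

-- ===== PRECONDITION & SPEC =====
def Spec_collect_beat_lists (entrance_lists : List (List (List Int))) (out : List (List (List (List Int)))) : Prop := out = collect_beat_lists_alt entrance_lists
instance (entrance_lists : List (List (List Int))) (out : List (List (List (List Int)))) : Decidable (Spec_collect_beat_lists entrance_lists out) := by unfold Spec_collect_beat_lists; infer_instance

-- ===== CLAIM (what is proved, stated in full; the proofs are below) =====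
def Claim_equal_collect_beat_lists : Prop := ∀ (entrance_lists : List (List (List Int))), Dom_collect_beat_lists entrance_lists → Spec_collect_beat_lists entrance_lists (collect_beat_lists entrance_lists)

-- ===== LEMMAS AND PROOFS =====

-- does a simultaneous event contain a length-6 inner event?
def pvFlag (ev : List (List Int)) : Bool := ev.any (fun e => e.length == 6)

-- the common grouping shape both ports compute: aux localR need rest, where
-- need = "the previous event had a flag, keep extending the current group"
def pvAux (localR : List (List (List Int))) (need : Bool) :
    List (List (List Int)) → List (List (List (List Int)))
  | [] => [localR]
  | ev :: rest =>
    if need then pvAux (localR ++ [ev]) (pvFlag ev) rest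
    else localR :: pvAux [ev] (pvFlag ev) rest

def pvConsApp (l : List (List (List Int))) :
    List (List (List (List Int))) → List (List (List (List Int)))
  | [] => [l]
  | g :: gs => (l ++ g) :: gs

-- B's pieces, over Nat indices
def pvCuts (k : Nat) : List (List (List Int)) → List Nat
  | [] => []
  | ev :: rest => if pvFlag ev then pvCuts (k+1) rest else (k+1) :: pvCuts (k+1) rest

def pvNorm (n : Nat) (cs : List Nat) : List Nat :=
  if cs.getLast? = some n then cs else cs ++ [n]

def pvSlGo (xs : List (List (List Int))) (s : Nat) :
    List Nat → List (List (List (List Int)))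
  | [] => []
  | c :: cs => (xs.drop s).take (c - s) :: pvSlGo xs c cs

-- ---- A side ----

theorem pv_foldl_flag (ev : List (List Int)) (b : Bool) :
    List.foldl (fun need event => decide (event.length = 6) || need) b ev = (b || pvFlag ev) := by
  induction ev generalizing b with
  | nil => simp [pvFlag]
  | cons e t ih =>
    simp only [List.foldl_cons, pvFlag, List.any_cons]
    rw [ih]
    by_cases h : e.length = 6
    · simp [h]
    · have he : (e.length == 6) = false := by simp [h]
      simp [pvFlag, he, h]

theorem pvA_loop (rest : List (List (List Int))) (res : List (List (List (List Int))))
    (loc : List (List (List Int))) (need : Bool) :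
    (let s := rest.foldl pvStepA (res, loc, need, false); s.1 ++ [s.2.1]) = res ++ pvAux loc need rest := by
  induction rest generalizing res loc need with
  | nil => simp [pvAux]
  | cons ev r ih =>
    simp only [List.foldl_cons]
    cases need with
    | false =>
      have hstep : pvStepA (res, loc, false, false) ev = (res ++ [loc], [ev], pvFlag ev, false) := by
        simp [pvStepA, pv_foldl_flag]
      rw [hstep, ih]
      simp [pvAux]
    | true =>
      have hstep : pvStepA (res, loc, true, false) ev = (res, loc ++ [ev], pvFlag ev, false) := by
        simp [pvStepA, pv_foldl_flag]
      rw [hstep, ih]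
      simp [pvAux]

theorem pvA_eq_aux (xs : List (List (List Int))) :
    collect_beat_lists xs = pvAux [] true xs := by
  cases xs with
  | nil => simp [collect_beat_lists, pvAux]
  | cons ev rest =>
    show (let s := (ev :: rest).foldl pvStepA ([], [], false, true); s.1 ++ [s.2.1]) = _
    simp only [List.foldl_cons]
    have hstep : pvStepA ([], [], false, true) ev = ([], [ev], pvFlag ev, false) := by
      simp [pvStepA, pv_foldl_flag]
    rw [hstep, pvA_loop]
    simp [pvAux]

-- ---- B side ----

def pvCastL (cs : List Nat) : List Int := cs.map (fun m => (m : Int))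

theorem pvCastL_nil : pvCastL [] = [] := rfl

theorem pvCastL_cons (c : Nat) (cs : List Nat) : pvCastL (c :: cs) = (c : Int) :: pvCastL cs := rfl

theorem pvCastL_getLast? (cs : List Nat) : (pvCastL cs).getLast? = cs.getLast?.map (fun m => (m : Int)) := by
  induction cs with
  | nil => rfl
  | cons c t ih =>
    cases t with
    | nil => rfl
    | cons d u =>
      rw [pvCastL_cons c (d :: u), pvCastL_cons d u, List.getLast?_cons_cons,
        List.getLast?_cons_cons, ← pvCastL_cons d u, ih]

theorem pvB_cuts (xs : List (List (List Int))) (s : Nat) :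
    (PySem.List.enumerate xs (s : Int)).filterMap
      (fun p => if p.2.any (fun e => e.length == 6) then none else some (p.1 + 1))
      = pvCastL (pvCuts s xs) := by
  induction xs generalizing s with
  | nil => simp [PySem.List.enumerate_nil, pvCuts, pvCastL]
  | cons ev rest ih =>
    rw [PySem.List.enumerate_cons]
    have hc : ((s : Int) + 1) = ((s + 1 : Nat) : Int) := by push_cast; ring
    have htail : (PySem.List.enumerate rest ((s : Int) + 1)).filterMap
        (fun p => if p.2.any (fun e => e.length == 6) then none else some (p.1 + 1))
        = pvCastL (pvCuts (s + 1) rest) := by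
      rw [hc]; exact ih (s + 1)
    cases h : pvFlag ev with
    | true =>
      simp only [pvCuts, h, if_true]
      rw [← htail]
      exact List.filterMap_cons_none (by
        show (if ev.any (fun e => e.length == 6) then none else some ((s : Int) + 1)) = none
        rw [show (ev.any fun e => e.length == 6) = true from h, if_pos rfl])
    | false =>
      simp only [pvCuts, h, Bool.false_eq_true, if_false]
      rw [pvCastL_cons, ← htail, ← hc]
      exact List.filterMap_cons_some (by
        show (if ev.any (fun e => e.length == 6) then none else some ((s : Int) + 1))
          = some ((s : Int) + 1)
        rw [show (ev.any fun e => e.length == 6) = false from h]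
        rfl)

theorem pv_norm_map (n : Nat) (cs : List Nat) :
    (if (pvCastL cs).getLast? = some ((n : Nat) : Int)
       then pvCastL cs
       else pvCastL cs ++ [((n : Nat) : Int)])
    = pvCastL (pvNorm n cs) := by
  rw [pvCastL_getLast?, pvNorm]
  cases h : cs.getLast? with
  | none => simp [pvCastL]
  | some m =>
    by_cases hm : m = n
    · simp [hm]
    · have hm' : ¬ ((m : Int) = (n : Int)) := by exact_mod_cast hm
      simp [hm, hm', pvCastL]

theorem pvB_foldl (xs : List (List (List Int))) (cs : List Nat) (res : List (List (List (List Int)))) (s : Nat) :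
    ((pvCastL cs).foldl
      (fun (t : List (List (List (List Int))) × Int) cut =>
        (t.1 ++ [PySem.List.slice xs (some t.2) (some cut)], cut))
      (res, (s : Int))).1 = res ++ pvSlGo xs s cs := by
  induction cs generalizing res s with
  | nil => simp [pvCastL_nil, pvSlGo]
  | cons c t ih =>
    rw [pvCastL_cons, List.foldl_cons]
    simp only [PySem.List.slice_natCast]
    rw [ih]
    simp [pvSlGo]

theorem pv_cuts_lt (k : Nat) (rest : List (List (List Int))) :
    ∀ m ∈ pvCuts k rest, k < m := by
  induction rest generalizing k with
  | nil => simp [pvCuts]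
  | cons ev r ih =>
    intro m hm
    simp only [pvCuts] at hm
    by_cases h : pvFlag ev
    · simp only [h, if_true] at hm
      exact Nat.lt_of_succ_le (Nat.le_of_lt (ih (k+1) m hm))
    · simp only [h] at hm
      rcases List.mem_cons.mp hm with h' | h'
      · omega
      · exact Nat.lt_of_succ_le (Nat.le_of_lt (ih (k+1) m h'))

theorem pv_slGo_shift (xs : List (List (List Int))) (s : Nat) (ev : List (List Int))
    (hdrop : xs.drop s = ev :: xs.drop (s+1)) (L : List Nat) (hne : L ≠ [])
    (hL : ∀ m ∈ L, s + 1 ≤ m) :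
    pvSlGo xs s L = pvConsApp [ev] (pvSlGo xs (s+1) L) := by
  cases L with
  | nil => exact absurd rfl hne
  | cons c cs =>
    have hc : s + 1 ≤ c := hL c (List.mem_cons_self)
    simp only [pvSlGo, pvConsApp, hdrop]
    have h1 : c - s = (c - (s+1)) + 1 := by omega
    rw [h1, List.take_succ_cons]
    simp

theorem pv_aux_append (rest : List (List (List Int))) (l m : List (List (List Int))) (need : Bool) :
    pvAux (l ++ m) need rest = pvConsApp l (pvAux m need rest) := by
  induction rest generalizing m need with
  | nil => simp [pvAux, pvConsApp]
  | cons ev r ih =>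
    cases need with
    | false => simp [pvAux, pvConsApp]
    | true =>
      simp only [pvAux, if_true]
      rw [List.append_assoc, ih]

theorem pv_norm_cons (n c : Nat) (cs : List Nat) (hne : c ≠ n) :
    pvNorm n (c :: cs) = c :: pvNorm n cs := by
  rw [pvNorm, pvNorm]
  cases cs with
  | nil => simp [hne]
  | cons a b => rw [List.getLast?_cons_cons]; split <;> simp_all

theorem pv_main (rest pfx : List (List (List Int))) :
    pvSlGo (pfx ++ rest) pfx.length
      (pvNorm (pfx.length + rest.length) (pvCuts pfx.length rest)) = pvAux [] true rest := by
  induction rest generalizing pfx with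
  | nil =>
    simp [pvCuts, pvNorm, pvSlGo, pvAux]
  | cons ev rest' ih =>
    have hdrop : (pfx ++ ev :: rest').drop pfx.length = ev :: (pfx ++ ev :: rest').drop (pfx.length + 1) := by
      rw [List.drop_append_of_le_length (le_refl _), List.drop_length]
      have : pfx.length + 1 = (pfx ++ [ev]).length := by simp
      rw [this]
      rw [show pfx ++ ev :: rest' = (pfx ++ [ev]) ++ rest' by simp]
      rw [List.drop_append_of_le_length (le_refl _), List.drop_length]
      simp
    have hpfx1 : (pfx ++ [ev]).length = pfx.length + 1 := by simp
    have ihev := ih (pfx ++ [ev])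
    rw [show (pfx ++ [ev]) ++ rest' = pfx ++ ev :: rest' by simp] at ihev
    rw [hpfx1] at ihev
    by_cases h : pvFlag ev
    · -- no cut after ev: the group extends
      simp only [pvCuts, h, if_true]
      have hlen : pfx.length + (ev :: rest').length = (pfx.length + 1) + rest'.length := by
        simp; omega
      rw [hlen]
      have hmem : ∀ m ∈ pvNorm ((pfx.length + 1) + rest'.length) (pvCuts (pfx.length + 1) rest'),
          pfx.length + 1 ≤ m := by
        intro m hm
        rw [pvNorm] at hm
        split at hm
        · exact Nat.le_of_lt (pv_cuts_lt _ _ m hm)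
        · rcases List.mem_append.mp hm with h' | h'
          · exact Nat.le_of_lt (pv_cuts_lt _ _ m h')
          · simp at h'; omega
      have hnn : pvNorm ((pfx.length + 1) + rest'.length) (pvCuts (pfx.length + 1) rest') ≠ [] := by
        rw [pvNorm]
        split
        · rename_i hlast
          intro hnil
          rw [hnil] at hlast
          simp at hlast
        · exact List.append_ne_nil_of_right_ne_nil _ (by simp)
      rw [pv_slGo_shift _ _ ev hdrop _ hnn hmem, ihev]
      have haux : pvAux [] true (ev :: rest') = pvConsApp [ev] (pvAux [] true rest') := by
        show (if true then pvAux ([] ++ [ev]) (pvFlag ev) rest'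
              else [] :: pvAux [ev] (pvFlag ev) rest') = _
        rw [if_pos rfl, List.nil_append, h]
        have h2 := pv_aux_append rest' [ev] [] true
        rw [List.append_nil] at h2
        exact h2
      rw [haux]
    · -- cut after ev
      cases rest' with
      | nil =>
        rw [show pvCuts pfx.length [ev] = [pfx.length + 1] by
          simp only [pvCuts]; rw [if_neg h]]
        have : pvNorm (pfx.length + [ev].length) ([pfx.length + 1]) = [pfx.length + 1] := by
          simp [pvNorm]
        rw [this]
        simp only [pvSlGo, hdrop]
        simp [pvAux, h]
      | cons ev2 r2 =>
        rw [show pvCuts pfx.length (ev :: ev2 :: r2)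
            = (pfx.length + 1) :: pvCuts (pfx.length + 1) (ev2 :: r2) by
          conv_lhs => rw [pvCuts]
          rw [if_neg h]]
        have hne : pfx.length + 1 ≠ pfx.length + (ev :: ev2 :: r2).length := by simp only [List.length_cons]; omega
        rw [pv_norm_cons _ _ _ hne]
        simp only [pvSlGo, hdrop]
        have htake : (ev :: (pfx ++ ev :: ev2 :: r2).drop (pfx.length + 1)).take (pfx.length + 1 - pfx.length) = [ev] := by
          have : pfx.length + 1 - pfx.length = 1 := by omega
          rw [this]; simp
        rw [htake]
        have hlen : pfx.length + (ev :: ev2 :: r2).length = (pfx.length + 1) + (ev2 :: r2).length := by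
          simp; omega
        rw [hlen, ihev]
        simp [pvAux, h]

theorem pvB_eq_aux (xs : List (List (List Int))) :
    collect_beat_lists_alt xs = pvAux [] true xs := by
  show (let n : Int := xs.length
    let cuts : List Int :=
      (PySem.List.enumerate xs 0).filterMap
        (fun p => if p.2.any (fun e => e.length == 6) then none else some (p.1 + 1))
    let cuts := if cuts.getLast? = some n then cuts else cuts ++ [n]
    (cuts.foldl
      (fun (s : List (List (List (List Int))) × Int) cut =>
        (s.1 ++ [PySem.List.slice xs (some s.2) (some cut)], cut))
      ([], 0)).1) = _
  have h0 : (0 : Int) = ((0 : Nat) : Int) := by norm_num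
  simp only []
  rw [show (0 : Int) = ((0 : Nat) : Int) from rfl, pvB_cuts xs 0, pv_norm_map xs.length (pvCuts 0 xs),
    pvB_foldl xs _ [] 0]
  have := pv_main xs []
  simp only [List.nil_append, List.length_nil, Nat.zero_add] at this
  rw [List.nil_append, this]

-- ===== VERDICT (by name: the statement is the Claim_ definition above) =====
theorem collect_beat_lists_spec : Claim_equal_collect_beat_lists := by
  intro xs _
  show collect_beat_lists xs = collect_beat_lists_alt xs
  rw [pvA_eq_aux, pvB_eq_aux]
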